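-- pv_equiv track=rewrite | github.com/ylmzKasap/Tower-of-Hanoi | Tower of Hanoi.py | get_landing_area
-- ===== SOURCE A (Python) =====
-- def landing_area_loop(positionList):
--     landingArea = 0
--     for row in positionList:
--         if row != 0:
--             return row, landingArea - 1
--         landingArea += 1
--     return 0, landingArea - 1
--
-- def get_landing_area(positionList) -> object:
--     one = [positionList[i][0] for i in range(len(positionList))]
--     two = [positionList[i][1] for i in range(len(positionList))]
--     three = [positionList[i][2] for i in range(len(positionList))]
--
--     topOne, landingOne = landing_area_loop(one)
--     topTwo, landingTwo = landing_area_loop(two)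
--     topThree, landingThree = landing_area_loop(three)
--
--     return topOne, topTwo, topThree, landingOne, landingTwo, landingThree
-- ===== SOURCE B (Python) =====
-- def get_landing_area(positionList) -> object:
--     n = len(positionList)
--     tops = [0, 0, 0]
--     landings = [n - 1, n - 1, n - 1]
--     found = [False, False, False]
--     i = 0
--     for row in positionList:
--         for c in range(3):
--             if not found[c] and row[c] != 0:
--                 tops[c] = row[c]
--                 landings[c] = i - 1
--                 found[c] = True
--         i += 1
--     return tops[0], tops[1], tops[2], landings[0], landings[1], landings[2]
-- ===== Notes on version B (the rewrite author's own statement) =====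
-- stated objective: alternative
-- what changed: One fused pass over the rows with per-column top/landing accumulators and found flags replaces the three column-extracting comprehensions and the helper scan.
import Mathlib
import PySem

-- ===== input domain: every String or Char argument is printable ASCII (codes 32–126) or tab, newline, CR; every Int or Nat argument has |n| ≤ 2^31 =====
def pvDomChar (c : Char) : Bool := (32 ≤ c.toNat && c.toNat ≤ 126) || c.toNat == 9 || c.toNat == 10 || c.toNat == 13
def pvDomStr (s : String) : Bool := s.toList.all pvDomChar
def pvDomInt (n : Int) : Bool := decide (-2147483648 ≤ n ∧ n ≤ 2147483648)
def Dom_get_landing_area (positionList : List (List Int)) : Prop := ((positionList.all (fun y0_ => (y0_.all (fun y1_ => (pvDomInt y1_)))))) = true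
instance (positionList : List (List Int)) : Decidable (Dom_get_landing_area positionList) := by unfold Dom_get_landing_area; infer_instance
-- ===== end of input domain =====

-- B does one fused pass over the rows instead of A's three column comprehensions plus helper scans; equal return values proved on rows of length ≥ 3.

-- ===== PORT A =====
-- landing_area_loop, with its running counter `landingArea` as the accumulator
def lal (xs : List Int) (landingArea : Int) : Int × Int :=
  match xs with
  | [] => (0, landingArea - 1)
  | x :: rest => if x ≠ 0 then (x, landingArea - 1) else lal rest (landingArea + 1)

def get_landing_area (positionList : List (List Int)) : Int × Int × Int × Int × Int × Int :=
  let n : Int := positionList.length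
  let one := (PySem.List.pyRange 0 n 1).map (fun i => PySem.List.pyGetD (PySem.List.pyGetD positionList i []) 0 0)
  let two := (PySem.List.pyRange 0 n 1).map (fun i => PySem.List.pyGetD (PySem.List.pyGetD positionList i []) 1 0)
  let three := (PySem.List.pyRange 0 n 1).map (fun i => PySem.List.pyGetD (PySem.List.pyGetD positionList i []) 2 0)
  ((lal one 0).1, (lal two 0).1, (lal three 0).1, (lal one 0).2, (lal two 0).2, (lal three 0).2)

-- ===== PORT B =====
-- one column's update for a single row: state = (found, top, landing)
def stepCol (i v : Int) (s : Bool × Int × Int) : Bool × Int × Int :=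
  if s.1 = false ∧ v ≠ 0 then (true, v, i - 1) else s

-- the single fused loop of Source B, carrying the row index i and the three column states
def altLoop : List (List Int) → Int → (Bool × Int × Int) → (Bool × Int × Int) → (Bool × Int × Int) →
    (Bool × Int × Int) × (Bool × Int × Int) × (Bool × Int × Int)
  | [], _, s0, s1, s2 => (s0, s1, s2)
  | row :: rest, i, s0, s1, s2 =>
      altLoop rest (i + 1)
        (stepCol i (PySem.List.pyGetD row 0 0) s0)
        (stepCol i (PySem.List.pyGetD row 1 0) s1)
        (stepCol i (PySem.List.pyGetD row 2 0) s2)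

def get_landing_area_alt (positionList : List (List Int)) : Int × Int × Int × Int × Int × Int :=
  let n : Int := positionList.length
  let r := altLoop positionList 0 (false, 0, n - 1) (false, 0, n - 1) (false, 0, n - 1)
  (r.1.2.1, r.2.1.2.1, r.2.2.2.1, r.1.2.2, r.2.1.2.2, r.2.2.2.2)

-- ===== PRECONDITION & SPEC =====
-- A indexes row[0], row[1], row[2] in every row, so it raises IndexError on any row of length < 3.
def Pre_get_landing_area (positionList : List (List Int)) : Prop :=
  ∀ row ∈ positionList, 3 ≤ row.length
instance (positionList : List (List Int)) : Decidable (Pre_get_landing_area positionList) := by unfold Pre_get_landing_area; infer_instance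

def pvWitness_get_landing_area : List (List Int) := [[0, 0, 3], [1, 0, 0], [2, 5, 4]]

def Spec_get_landing_area (positionList : List (List Int)) (out : Int × Int × Int × Int × Int × Int) : Prop := out = get_landing_area_alt positionList
instance (positionList : List (List Int)) (out : Int × Int × Int × Int × Int × Int) : Decidable (Spec_get_landing_area positionList out) := by unfold Spec_get_landing_area; infer_instance

-- ===== CLAIM (what is proved, stated in full; the proofs are below) =====
def Claim_equal_get_landing_area : Prop := ∀ (positionList : List (List Int)), Dom_get_landing_area positionList → Pre_get_landing_area positionList → Spec_get_landing_area positionList (get_landing_area positionList)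

-- ===== LEMMAS AND PROOFS =====

-- single-column view of B's fused loop (proof helper only)
def colLoop (f : List Int → Int) : List (List Int) → Int → (Bool × Int × Int) → (Bool × Int × Int)
  | [], _, s => s
  | row :: rest, i, s => colLoop f rest (i + 1) (stepCol i (f row) s)

theorem altLoop_eq (rows : List (List Int)) : ∀ (i : Int) s0 s1 s2,
    altLoop rows i s0 s1 s2 =
      (colLoop (fun row => PySem.List.pyGetD row 0 0) rows i s0,
       colLoop (fun row => PySem.List.pyGetD row 1 0) rows i s1,
       colLoop (fun row => PySem.List.pyGetD row 2 0) rows i s2) := by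
  induction rows with
  | nil => intro i s0 s1 s2; rfl
  | cons row rest ih => intro i s0 s1 s2; simp [altLoop, colLoop, ih]

theorem colLoop_found (f : List Int → Int) (rows : List (List Int)) : ∀ (i t l : Int),
    colLoop f rows i (true, t, l) = (true, t, l) := by
  induction rows with
  | nil => intro i t l; rfl
  | cons row rest ih => intro i t l; simp [colLoop, stepCol, ih]

theorem colLoop_lal (f : List Int → Int) (rows : List (List Int)) : ∀ (i L : Int),
    L = i + rows.length - 1 →
    ((colLoop f rows i (false, 0, L)).2.1, (colLoop f rows i (false, 0, L)).2.2) =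
      lal (rows.map f) i := by
  induction rows with
  | nil =>
    intro i L hL
    simp only [List.length_nil, Int.natCast_zero] at hL
    simp [colLoop, lal]
    omega
  | cons row rest ih =>
    intro i L hL
    by_cases hv : f row = 0
    · have hL' : L = (i + 1) + rest.length - 1 := by
        simp [List.length_cons] at hL; omega
      simp [colLoop, stepCol, hv, lal, ih (i + 1) L hL']
    · simp [colLoop, stepCol, hv, lal, colLoop_found]

theorem col_eq (positionList : List (List Int)) (c : Int) :
    (PySem.List.pyRange 0 (positionList.length : Int) 1).map
        (fun i => PySem.List.pyGetD (PySem.List.pyGetD positionList i []) c 0) =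
      positionList.map (fun row => PySem.List.pyGetD row c 0) := by
  have h1 : (PySem.List.pyRange 0 (positionList.length : Int) 1).map
      (fun i => PySem.List.pyGetD positionList i []) = positionList :=
    PySem.List.map_pyGetD_pyRange_zero ..
  conv_rhs => rw [← h1, List.map_map]
  rfl

-- ===== VERDICT (by name: the statement is the Claim_ definition above) =====
theorem get_landing_area_spec : Claim_equal_get_landing_area := by
  intro pl _ _
  unfold Spec_get_landing_area get_landing_area get_landing_area_alt
  simp only [col_eq, altLoop_eq]
  have h0 := colLoop_lal (fun row => PySem.List.pyGetD row 0 0) pl 0 ((pl.length : Int) - 1) (by omega)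
  have h1 := colLoop_lal (fun row => PySem.List.pyGetD row 1 0) pl 0 ((pl.length : Int) - 1) (by omega)
  have h2 := colLoop_lal (fun row => PySem.List.pyGetD row 2 0) pl 0 ((pl.length : Int) - 1) (by omega)
  rw [Prod.ext_iff] at h0 h1 h2
  simp only [Prod.mk.injEq]
  exact ⟨h0.1.symm, h1.1.symm, h2.1.symm, h0.2.symm, h1.2.symm, h2.2.symm⟩
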